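-- pv_equiv track=rewrite | github.com/7anan5anom/albleu | albleu.py | one_surface
-- ===== SOURCE A (Python) =====
-- def one_surface(words,dict,n):
--     length = len(words)
--     array = {}
--     for i in range(length+1-n):
--         seg = []
--         for j in range(n):
--             seg.append([])
--         stemCount = 0
--         count = 0
--         surface_word = [""]*n
--         for st in range(i,i+n):
--             for j in range(n):
--                 if j == stemCount:
--                     seg[j].append(words[st])
--                     surface_word[count] = words[st]
--                     count += 1
--                 else:
--                     if words[st] in dict.keys():
--                         stem = dict[words[st]]
--                         if len(stem) > 0:
--                             seg[j].append(stem[0])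
--             stemCount += 1
--         count = 0
--         for j in range(n):
--             if len(seg[j]) == n:
--                 array[(i,surface_word[count])] = " ".join(seg[j])
--             count += 1
--     return array
-- ===== SOURCE B (Python) =====
-- def one_surface(words, dict, n):
--     # Precompute each word's stem once; per window count the words without a
--     # stem and build the n-word segment strings only for the (at most n)
--     # windows/positions that can yield one.
--     if n <= 0:
--         return {}
--     stems = [(dict[w][0] if dict.get(w) else None) for w in words]
--     out = {}
--     for i in range(len(words) + 1 - n):
--         window = stems[i:i + n]
--         missing = window.count(None)
--         if missing == 0:
--             for j in range(n):
--                 w = words[i + j]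
--                 out[(i, w)] = " ".join(window[:j] + [w] + window[j + 1:])
--         elif missing == 1:
--             m = window.index(None)
--             w = words[i + m]
--             out[(i, w)] = " ".join(window[:m] + [w] + window[m + 1:])
--     return out
-- ===== Notes on version B (the rewrite author's own statement) =====
-- stated objective: faster
-- what changed: B precomputes each word's stem once and, per sliding window, counts the words lacking a stem, emitting segment strings only for the qualifying positions (all n when none is missing, the single missing position when one is), replacing A's per-window n-by-n nested loops that build n candidate segments with repeated dict lookups.
import Mathlib
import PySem

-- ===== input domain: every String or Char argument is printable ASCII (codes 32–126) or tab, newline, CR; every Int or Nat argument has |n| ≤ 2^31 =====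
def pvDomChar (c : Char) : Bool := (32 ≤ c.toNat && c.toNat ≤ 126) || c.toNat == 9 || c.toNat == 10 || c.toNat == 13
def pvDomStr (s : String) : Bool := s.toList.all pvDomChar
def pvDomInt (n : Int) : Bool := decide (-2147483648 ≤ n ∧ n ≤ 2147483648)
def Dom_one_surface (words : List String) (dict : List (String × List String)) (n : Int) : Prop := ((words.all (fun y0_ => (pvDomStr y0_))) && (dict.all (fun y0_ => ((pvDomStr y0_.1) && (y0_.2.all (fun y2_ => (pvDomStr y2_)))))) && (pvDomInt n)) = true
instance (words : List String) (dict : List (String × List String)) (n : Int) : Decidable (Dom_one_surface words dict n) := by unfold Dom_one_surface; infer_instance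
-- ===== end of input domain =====

-- B precomputes each word's stem once and, per window, counts the words without a
-- stem, building segment strings only for the positions that can yield one,
-- instead of A's per-window n×n nested append loops (alternative algorithm).

-- ===== PORT A =====
-- one iteration of the inner 'for j in range(n)' body; state = (seg, count, surface_word)
def aJStep (words : List String) (d : PySem.Dict String (List String)) (st stemCount : Int)
    (t : List (List String) × Int × List String) (j : Int) : List (List String) × Int × List String :=
  let w := (PySem.List.pyGet? words st).getD ""   -- words[st]; st is always in range when this loop runs
  if j == stemCount then
    -- seg[j].append(words[st]); surface_word[count] = words[st]; count += 1
    -- (0 ≤ j < n = len(seg) and 0 ≤ count < n = len(surface_word) whenever this loop runs, so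
    --  .toNat/List.modify/List.set are exact for Python's seg[j] / surface_word[count] assignment)
    (t.1.modify j.toNat (fun l => l ++ [w]), t.2.1 + 1, t.2.2.set t.2.1.toNat w)
  else
    match PySem.Dict.get? d w with
    | some stem =>
        if 0 < stem.length then
          (t.1.modify j.toNat (fun l => l ++ [(PySem.List.pyGet? stem 0).getD ""]), t.2.1, t.2.2)
        else t
    | none => t

-- one iteration of 'for st in range(i, i+n)'; state = (seg, stemCount, count, surface_word)
def aStStep (words : List String) (d : PySem.Dict String (List String)) (n : Int)
    (s : List (List String) × Int × Int × List String) (st : Int) :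
    List (List String) × Int × Int × List String :=
  let r := (PySem.List.pyRange 0 n).foldl (aJStep words d st s.2.1) (s.1, s.2.2.1, s.2.2.2)
  (r.1, s.2.1 + 1, r.2.1, r.2.2)

-- one iteration of the final 'for j in range(n)'; state = (array, count)
def aFinStep (n i : Int) (seg : List (List String)) (surf : List String)
    (t : PySem.Dict (Int × String) String × Int) (j : Int) :
    PySem.Dict (Int × String) String × Int :=
  let sj := seg.getD j.toNat []
  if ((sj.length : Int) == n) then
    (t.1.insert (i, surf.getD t.2.toNat "") (PySem.Str.join " " sj), t.2 + 1)
  else (t.1, t.2 + 1)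

-- the whole body of 'for i in range(length+1-n)'
def aWindow (words : List String) (d : PySem.Dict String (List String)) (n : Int)
    (array : PySem.Dict (Int × String) String) (i : Int) : PySem.Dict (Int × String) String :=
  let seg0 := (PySem.List.pyRange 0 n).foldl (fun acc _ => acc ++ [([] : List String)]) []
  let surf0 := PySem.List.pyRepeat [""] n          -- [""]*n
  let r := (PySem.List.pyRange i (i + n)).foldl (aStStep words d n) (seg0, 0, 0, surf0)
  ((PySem.List.pyRange 0 n).foldl (aFinStep n i r.1 r.2.2.2) (array, 0)).1

def one_surface (words : List String) (dict : List (String × List String)) (n : Int) :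
    List (Int × String × String) :=
  let d := PySem.Dict.ofList dict
  (((PySem.List.pyRange 0 ((words.length : Int) + 1 - n)).foldl (aWindow words d n)
      PySem.Dict.empty).items).map (fun kv => (kv.1.1, kv.1.2, kv.2))

-- ===== PORT B =====
-- dict[w][0] if dict.get(w) else None
def stemOf (d : PySem.Dict String (List String)) (w : String) : Option String :=
  match PySem.Dict.get? d w with
  | some s => if 0 < s.length then some ((PySem.List.pyGet? s 0).getD "") else none
  | none => none

-- " ".join(window[:j] + [w] + window[j+1:]); on the branches where B calls this the
-- joined entries are never None, so mapping Option.getD "" is exact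
def bEntry (window : List (Option String)) (w : String) (j : Nat) : String :=
  PySem.Str.join " "
    ((PySem.List.slice window none (some (j : Int)) ++ [some w] ++
      PySem.List.slice window (some ((j : Int) + 1)) none).map (fun o => o.getD ""))

def bWindow (words : List String) (stems : List (Option String)) (n : Int)
    (out : PySem.Dict (Int × String) String) (i : Int) : PySem.Dict (Int × String) String :=
  let window := PySem.List.slice stems (some i) (some (i + n))
  let missing := window.count none
  if missing == 0 then
    (PySem.List.pyRange 0 n).foldl (fun out j =>
      let w := (PySem.List.pyGet? words (i + j)).getD ""
      out.insert (i, w) (bEntry window w j.toNat)) out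
  else if missing == 1 then
    let m := (PySem.List.index? window none).getD 0
    let w := (PySem.List.pyGet? words (i + (m : Int))).getD ""
    out.insert (i, w) (bEntry window w m)
  else out

def one_surface_alt (words : List String) (dict : List (String × List String)) (n : Int) :
    List (Int × String × String) :=
  if n ≤ 0 then []
  else
    let d := PySem.Dict.ofList dict
    let stems := words.map (stemOf d)
    (((PySem.List.pyRange 0 ((words.length : Int) + 1 - n)).foldl (bWindow words stems n)
        PySem.Dict.empty).items).map (fun kv => (kv.1.1, kv.1.2, kv.2))

-- ===== PRECONDITION & SPEC =====
def Spec_one_surface (words : List String) (dict : List (String × List String)) (n : Int) (out : List (Int × String × String)) : Prop := out = one_surface_alt words dict n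
instance (words : List String) (dict : List (String × List String)) (n : Int) (out : List (Int × String × String)) : Decidable (Spec_one_surface words dict n out) := by unfold Spec_one_surface; infer_instance

-- ===== CLAIM (what is proved, stated in full; the proofs are below) =====
def Claim_equal_one_surface : Prop := ∀ (words : List String) (dict : List (String × List String)) (n : Int), Dom_one_surface words dict n → Spec_one_surface words dict n (one_surface words dict n)

-- ===== LEMMAS AND PROOFS =====

-- the window words[i:i+n]
def pvWin (words : List String) (i : Int) (N : Nat) : List String := (words.drop i.toNat).take N

-- the element A appends for source position t of the window while building seg[j]
def pvEnt (d : PySem.Dict String (List String)) (win : List String) (j t : Nat) : Option String :=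
  if t = j then some (win.getD t "") else stemOf d (win.getD t "")

-- seg[j] after the first k source positions have been processed
def pvEntries (d : PySem.Dict String (List String)) (win : List String) (j k : Nat) : List String :=
  (List.range k).filterMap (pvEnt d win j)

-- A's final-loop test 'len(seg[j]) == n'
def pvOkJ (d : PySem.Dict String (List String)) (win : List String) (n : Int) (j : Nat) : Bool :=
  ((pvEntries d win j n.toNat).length : Int) == n
lemma pv_modify_step {α : Type} (L T : List α) (hT : T.length = L.length) (m : Nat)
    (hm : m < L.length) (g : α → α) (hg : g L[m] = T[m]) :
    (T.take m ++ L.drop m).modify m g = T.take (m+1) ++ L.drop (m+1) := by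
  have hmT : m < T.length := by omega
  have l1 : (T.take m).length = m := by simp; omega
  have l2 : (T.take (m+1)).length = m + 1 := by simp; omega
  apply List.ext_getElem
  · simp; omega
  · intro j h1 h2
    rw [List.getElem_modify]
    rcases lt_trichotomy j m with h | h | h
    · rw [if_neg (by omega), List.getElem_append_left (by omega),
        List.getElem_append_left (by omega), List.getElem_take, List.getElem_take]
    · subst h
      rw [if_pos rfl, List.getElem_append_right (by omega), List.getElem_append_left (by omega),
        List.getElem_take, List.getElem_drop]
      simp [l1, hg]
    · rw [if_neg (by omega), List.getElem_append_right (by omega),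
        List.getElem_append_right (by omega), List.getElem_drop, List.getElem_drop]
      simp only [l1, l2]
      congr 1; omega

lemma pv_skip_step {α : Type} (L T : List α) (hT : T.length = L.length) (m : Nat)
    (hm : m < L.length) (hg : T[m] = L[m]) :
    T.take m ++ L.drop m = T.take (m+1) ++ L.drop (m+1) := by
  have := pv_modify_step L T hT m hm id (by simpa using hg.symm)
  simpa [List.modify_id] using this

lemma pv_mapIdx_map_range {α β : Type} (N : Nat) (g : Nat → α) (f : Nat → α → β) :
    List.mapIdx f ((List.range N).map g) = (List.range N).map (fun j => f j (g j)) := by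
  apply List.ext_getElem
  · simp
  · intro j h1 h2
    simp [List.getElem_mapIdx]

lemma pv_filterMap_eq_map {α β : Type} (l : List α) (f : α → Option β) (dflt : β)
    (h : ∀ x ∈ l, (f x).isSome) :
    l.filterMap f = l.map (fun x => (f x).getD dflt) := by
  induction l with
  | nil => rfl
  | cons x xs ih =>
    have hx := h x (by simp)
    rcases Option.isSome_iff_exists.mp hx with ⟨v, hv⟩
    simp [hv, ih (fun y hy => h y (by simp [hy]))]

lemma pv_aJ_fold (words : List String) (d : PySem.Dict String (List String)) (st c : Int) (hc : 0 ≤ c) :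
    ∀ (m : Nat) (seg : List (List String)) (cnt : Int) (surf : List String), m ≤ seg.length →
    ((List.range m).map (Nat.cast : Nat → Int)).foldl (aJStep words d st c) (seg, cnt, surf)
    = ((seg.mapIdx (fun j l => if (j : Int) = c then l ++ [(PySem.List.pyGet? words st).getD ""]
          else l ++ (stemOf d ((PySem.List.pyGet? words st).getD "")).toList)).take m ++ seg.drop m,
       if c < (m : Int) then (cnt + 1, surf.set cnt.toNat ((PySem.List.pyGet? words st).getD ""))
       else (cnt, surf)) := by
  intro m
  induction m with
  | zero =>
    intro seg cnt surf _
    simp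
    omega
  | succ m ih =>
    intro seg cnt surf hm
    set w := (PySem.List.pyGet? words st).getD "" with hw
    set f : Nat → List String → List String :=
      (fun j l => if (j : Int) = c then l ++ [w] else l ++ (stemOf d w).toList) with hf
    have hT : (seg.mapIdx f).length = seg.length := by simp
    have hmlt : m < seg.length := by omega
    have hTm : (seg.mapIdx f)[m]'(by omega) = f m (seg[m]'hmlt) := List.getElem_mapIdx
    rw [List.range_succ, List.map_append, List.foldl_append]
    rw [ih seg cnt surf (by omega)]
    simp only [List.map_cons, List.map_nil, List.foldl_cons, List.foldl_nil]
    by_cases hmc : (m : Int) = c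
    · have hnot : ¬ c < (m : Int) := by omega
      have hyes : c < ((m+1 : Nat) : Int) := by push_cast; omega
      rw [if_neg hnot, if_pos hyes]
      show aJStep words d st c _ (m : Int) = _
      rw [aJStep]
      simp only [← hw, beq_iff_eq, if_pos hmc, Int.toNat_natCast]
      refine congrArg₂ Prod.mk ?_ rfl
      exact pv_modify_step seg (seg.mapIdx f) hT m hmlt _ (by rw [hTm, hf]; simp [hmc])
    · have hiff : (c < ((m+1 : Nat) : Int)) ↔ (c < (m : Int)) := by
        constructor <;> (intro h; push_cast at *; omega)
      show aJStep words d st c _ (m : Int) = _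
      rw [aJStep]
      simp only [← hw, beq_iff_eq, if_neg (fun h => hmc h), Int.toNat_natCast, hiff]
      rcases hget : PySem.Dict.get? d w with _ | stem
      · exact congrArg₂ Prod.mk (pv_skip_step seg (seg.mapIdx f) hT m hmlt
          (by rw [hTm, hf]; simp [if_neg hmc, stemOf, hget])) rfl
      · by_cases hlen : 0 < stem.length
        · simp only [if_pos hlen]
          exact congrArg₂ Prod.mk (pv_modify_step seg (seg.mapIdx f) hT m hmlt _
            (by rw [hTm, hf]; simp [if_neg hmc, stemOf, hget, hlen])) rfl
        · simp only [if_neg hlen]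
          exact congrArg₂ Prod.mk (pv_skip_step seg (seg.mapIdx f) hT m hmlt
            (by rw [hTm, hf]; simp [if_neg hmc, stemOf, hget, hlen])) rfl

lemma pv_win_length (words : List String) (i : Int) (N : Nat)
    (hlen : i.toNat + N ≤ words.length) : (pvWin words i N).length = N := by
  simp [pvWin]; omega

lemma pv_word_at (words : List String) (i : Int) (N : Nat) (hi : 0 ≤ i)
    (hlen : i.toNat + N ≤ words.length) (k : Nat) (hk : k < N) :
    (PySem.List.pyGet? words (i + (k : Int))).getD "" = (pvWin words i N).getD k "" := by
  rw [PySem.List.pyGet?_of_nonneg words (by omega)]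
  have h1 : (i + (k : Int)).toNat = i.toNat + k := by omega
  have h2 : i.toNat + k < words.length := by omega
  have h3 : k < (pvWin words i N).length := by rw [pv_win_length words i N hlen]; omega
  rw [h1]
  unfold pvWin
  simp [List.getD, List.getElem?_take_of_lt hk, List.getElem?_drop, List.getElem?_eq_getElem h2]

lemma pv_surf_set (win : List String) (N k : Nat) (hw : win.length = N) (hk : k < N) :
    (win.take k ++ List.replicate (N - k) "").set k (win.getD k "") =
      win.take (k+1) ++ List.replicate (N - (k+1)) "" := by
  have l1 : (win.take k).length = k := by simp; omega
  have l2 : (win.take (k+1)).length = k + 1 := by simp; omega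
  apply List.ext_getElem
  · simp; omega
  · intro j h1 h2
    rcases lt_trichotomy j k with h | h | h
    · rw [List.getElem_set_ne (by omega), List.getElem_append_left (by omega),
        List.getElem_append_left (by omega), List.getElem_take, List.getElem_take]
    · subst h
      rw [List.getElem_set_self, List.getElem_append_left (by omega), List.getElem_take]
      rw [List.getD_eq_getElem?_getD, List.getElem?_eq_getElem (by omega)]
      rfl
    · rw [List.getElem_set_ne (by omega), List.getElem_append_right (by omega),
        List.getElem_append_right (by omega), List.getElem_replicate, List.getElem_replicate]

lemma pv_aSt_fold (words : List String) (d : PySem.Dict String (List String)) (n i : Int)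
    (hn : 0 < n) (hi : 0 ≤ i) (hiN : i + n ≤ (words.length : Int)) :
    ∀ (k : Nat), k ≤ n.toNat →
    ((List.range k).map (fun (t : Nat) => i + (t : Int))).foldl (aStStep words d n)
      (List.replicate n.toNat [], 0, 0, List.replicate n.toNat "")
    = ((List.range n.toNat).map (fun j => pvEntries d (pvWin words i n.toNat) j k),
       (k : Int), (k : Int),
       (pvWin words i n.toNat).take k ++ List.replicate (n.toNat - k) "") := by
  have hlen : i.toNat + n.toNat ≤ words.length := by omega
  have hwl : (pvWin words i n.toNat).length = n.toNat := pv_win_length words i n.toNat hlen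
  intro k
  induction k with
  | zero =>
    intro _
    simp [pvEntries]
  | succ k ih =>
    intro hk
    rw [List.range_succ, List.map_append, List.foldl_append, ih (by omega)]
    simp only [List.map_cons, List.map_nil, List.foldl_cons, List.foldl_nil]
    rw [aStStep]
    simp only []
    rw [PySem.List.pyRange_zero n]
    have hseglen : ((List.range n.toNat).map (fun j => pvEntries d (pvWin words i n.toNat) j k)).length = n.toNat := by simp
    rw [pv_aJ_fold words d (i + (k : Int)) (k : Int) (by omega) n.toNat _ _ _ (by omega)]
    have hw : (PySem.List.pyGet? words (i + (k : Int))).getD ""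
        = (pvWin words i n.toNat).getD k "" := pv_word_at words i n.toNat hi hlen k (by omega)
    refine congrArg₂ Prod.mk ?_ ?_
    · -- seg component
      rw [List.take_of_length_le (by simp [hseglen]), List.drop_of_length_le (by omega),
        List.append_nil, pv_mapIdx_map_range]
      apply List.map_congr_left
      intro j hj
      rw [hw]
      unfold pvEntries
      rw [List.range_succ, List.filterMap_append]
      by_cases hjk : j = k
      · subst hjk
        simp [pvEnt]
      · have h2 : ¬ (j : Int) = (k : Int) := by exact_mod_cast hjk
        have h3 : ¬ k = j := fun h => hjk h.symm
        simp only [pvEnt, if_neg h2, List.getD]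
        rcases hs : stemOf d ((pvWin words i n.toNat)[k]?.getD "") with _ | v <;>
          simp [hs, if_neg h3]
    · -- (stemCount, count, surf) component
      rw [if_pos (by omega : (k : Int) < (n.toNat : Int))]
      refine congrArg₂ Prod.mk (by push_cast; ring) ?_
      refine congrArg₂ Prod.mk (by push_cast; ring) ?_
      rw [hw]
      simpa using pv_surf_set (pvWin words i n.toNat) n.toNat k hwl (by omega)

lemma pv_aFin_fold (n i : Int) (seg : List (List String)) (surf : List String) :
    ∀ (k : Nat) (a : PySem.Dict (Int × String) String),
    ((List.range k).map (Nat.cast : Nat → Int)).foldl (aFinStep n i seg surf) (a, 0)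
    = ((List.range k).foldl (fun a j =>
          if ((seg.getD j []).length : Int) == n then
            a.insert (i, surf.getD j "") (PySem.Str.join " " (seg.getD j []))
          else a) a,
       (k : Int)) := by
  intro k
  induction k with
  | zero => intro a; simp
  | succ k ih =>
    intro a
    rw [List.range_succ, List.map_append, List.foldl_append, List.foldl_append, ih a]
    simp only [List.map_cons, List.map_nil, List.foldl_cons, List.foldl_nil]
    rw [aFinStep]
    simp only [Int.toNat_natCast]
    by_cases h : ((seg.getD k []).length : Int) == n
    · simp only [h, if_pos]
      refine congrArg₂ Prod.mk rfl (by push_cast; ring)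
    · simp only [h]
      refine congrArg₂ Prod.mk rfl (by push_cast; ring)

lemma pv_two_le_count {α : Type} [BEq α] [LawfulBEq α] (l : List α) (a : α) (i j : Nat)
    (hij : i < j) (hj : j < l.length) (h1 : l[i]'(by omega) = a) (h2 : l[j] = a) :
    2 ≤ l.count a := by
  have hi : i < l.length := by omega
  have hmem1 : a ∈ l.take (i+1) := by
    rw [List.mem_iff_getElem]
    exact ⟨i, by simp [List.length_take]; omega, by rw [List.getElem_take]; exact h1⟩
  have hmem2 : a ∈ l.drop (i+1) := by
    rw [List.mem_iff_getElem]
    refine ⟨j - (i+1), by simp [List.length_drop]; omega, ?_⟩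
    rw [List.getElem_drop]
    have : i + 1 + (j - (i + 1)) = j := by omega
    simp_rw [this]
    exact h2
  calc 2 = 1 + 1 := rfl
    _ ≤ (l.take (i+1)).count a + (l.drop (i+1)).count a := by
        have c1 := List.count_pos_iff.mpr hmem1
        have c2 := List.count_pos_iff.mpr hmem2
        omega
    _ = l.count a := by rw [← List.count_append, List.take_append_drop]

lemma pv_exists_two {α : Type} [BEq α] [LawfulBEq α] (l : List α) (a : α) :
    2 ≤ l.count a → ∃ i j, ∃ (hj : j < l.length) (hij : i < j),
      l[i]'(Nat.lt_trans hij hj) = a ∧ l[j] = a := by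
  induction l with
  | nil => intro h; simp at h
  | cons x xs ih =>
    intro h
    by_cases hx : x = a
    · have : 1 ≤ xs.count a := by
        rw [List.count_cons, if_pos (by simp [hx])] at h; omega
      have hmem : a ∈ xs := List.count_pos_iff.mp (by omega)
      rcases List.mem_iff_getElem.mp hmem with ⟨t, ht, hta⟩
      exact ⟨0, t+1, by simpa using Nat.succ_lt_succ ht, by omega, by simpa using hx, by simpa using hta⟩

    · have : 2 ≤ xs.count a := by
        rw [List.count_cons, if_neg (by simp [hx])] at h; omega
      rcases ih this with ⟨i, j, hj, hij, g1, g2⟩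
      exact ⟨i+1, j+1, by simpa using Nat.succ_lt_succ hj, by omega, by simpa using g1, by simpa using g2⟩

lemma pv_okJ_iff (d : PySem.Dict String (List String)) (win : List String) (n : Int)
    (hn : 0 < n) (j : Nat) :
    pvOkJ d win n j = true ↔ ∀ t, t < n.toNat → t ≠ j → stemOf d (win.getD t "") ≠ none := by
  unfold pvOkJ pvEntries
  rw [beq_iff_eq, List.length_filterMap_eq_countP]
  constructor
  · intro h t ht htj
    have hNat : (List.range n.toNat).countP (fun t => (pvEnt d win j t).isSome) = n.toNat := by
      omega
    have := List.countP_eq_length.mp (by rw [hNat]; simp) t (by simpa using ht)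
    rw [pvEnt, if_neg htj] at this
    exact Option.isSome_iff_ne_none.mp this
  · intro h
    have : ∀ a ∈ List.range n.toNat, ((pvEnt d win j a).isSome) = true := by
      intro a ha
      rw [pvEnt]
      by_cases haj : a = j
      · simp [haj]
      · rw [if_neg haj]
        exact Option.isSome_iff_ne_none.mpr (h a (by simpa using ha) haj)
    rw [List.countP_eq_length.mpr this]
    simp
    omega

lemma pv_entries_eq (d : PySem.Dict String (List String)) (win : List String) (N : Nat)
    (hN : win.length = N) (j : Nat) (hj : j < N)
    (hok : ∀ t, t < N → t ≠ j → stemOf d (win.getD t "") ≠ none) :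
    pvEntries d win j N
    = ((win.map (stemOf d)).take j ++ [some (win.getD j "")] ++
        (win.map (stemOf d)).drop (j+1)).map (fun o => o.getD "") := by
  unfold pvEntries
  rw [pv_filterMap_eq_map _ _ ""
    (by
      intro t ht
      rw [pvEnt]
      by_cases htj : t = j
      · simp [htj]
      · rw [if_neg htj]
        exact Option.isSome_iff_ne_none.mpr (hok t (by simpa using ht) htj))]
  have hWl : (win.map (stemOf d)).length = N := by simp [hN]
  apply List.ext_getElem
  · simp; omega
  · intro t h1 h2
    have htN : t < N := by simpa using h1
    have hwt : ∀ (u : Nat) (hu : u < win.length), win.getD u "" = win[u] := by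
      intro u hu
      rw [List.getD_eq_getElem?_getD, List.getElem?_eq_getElem hu]
      rfl
    rw [List.getElem_map, List.getElem_map, List.getElem_range, pvEnt]
    rcases lt_trichotomy t j with h | h | h
    · rw [if_neg (by omega), List.getElem_append_left (by simp only [List.length_append, List.length_take, List.length_drop, List.length_map, List.length_cons, List.length_nil, hN]; omega),
        List.getElem_append_left (by simp only [List.length_append, List.length_take, List.length_drop, List.length_map, List.length_cons, List.length_nil, hN]; omega), List.getElem_take, List.getElem_map,
        hwt t (by omega)]
    · subst h
      rw [if_pos rfl, List.getElem_append_left (by simp only [List.length_append, List.length_take, List.length_drop, List.length_map, List.length_cons, List.length_nil, hN]; omega),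
        List.getElem_append_right (by simp only [List.length_append, List.length_take, List.length_drop, List.length_map, List.length_cons, List.length_nil, hN]; omega)]
      simp [hWl]
    · rw [if_neg (by omega), List.getElem_append_right (by simp only [List.length_append, List.length_take, List.length_drop, List.length_map, List.length_cons, List.length_nil, hN]; omega),
        List.getElem_drop, List.getElem_map, hwt t (by omega)]
      simp only [List.length_append, List.length_take, List.length_map, List.length_cons,
        List.length_nil, hN]
      simp only [show j + 1 + (t - (min j N + (0 + 1))) = t from by omega]

lemma pv_aWindow_char (words : List String) (d : PySem.Dict String (List String)) (n i : Int)
    (hn : 0 < n) (hi : 0 ≤ i) (hiN : i + n ≤ (words.length : Int))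
    (a : PySem.Dict (Int × String) String) :
    aWindow words d n a i
    = (List.range n.toNat).foldl (fun a j =>
        if pvOkJ d (pvWin words i n.toNat) n j then
          a.insert (i, (pvWin words i n.toNat).getD j "")
            (PySem.Str.join " " (pvEntries d (pvWin words i n.toNat) j n.toNat))
        else a) a := by
  have hlen : i.toNat + n.toNat ≤ words.length := by omega
  have hwl : (pvWin words i n.toNat).length = n.toNat := pv_win_length words i n.toNat hlen
  simp only [aWindow]
  rw [PySem.List.foldl_append_singleton_eq_map (f := fun _ => ([] : List String)),
      List.nil_append, PySem.List.pyRepeat_singleton]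
  have hseg0 : (PySem.List.pyRange 0 n).map (fun _ => ([] : List String))
      = List.replicate n.toNat [] := by
    rw [PySem.List.pyRange_zero]
    apply List.eq_replicate_iff.mpr
    constructor
    · simp
    · intro b hb
      simp at hb
      exact hb.2
  have hr : PySem.List.pyRange i (i + n) = (List.range n.toNat).map (fun (t : Nat) => i + (t : Int)) := by
    rw [PySem.List.pyRange_one]
    congr 2
    omega
  rw [hseg0, hr, pv_aSt_fold words d n i hn hi hiN n.toNat le_rfl,
      List.take_of_length_le (le_of_eq hwl), Nat.sub_self, List.replicate_zero, List.append_nil,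
      PySem.List.pyRange_zero, pv_aFin_fold]
  apply PySem.List.foldl_congr_mem'
  intro j hj a'
  have hjN : j < n.toNat := by simpa using hj
  have hgetD : ((List.range n.toNat).map (fun j => pvEntries d (pvWin words i n.toNat) j n.toNat)).getD j []
      = pvEntries d (pvWin words i n.toNat) j n.toNat := by
    simp [List.getD, hjN]
  rw [hgetD]
  rfl

lemma pv_window_eq (words : List String) (d : PySem.Dict String (List String)) (n i : Int)
    (hn : 0 < n) (hi : 0 ≤ i) (hiN : i + n ≤ (words.length : Int))
    (a : PySem.Dict (Int × String) String) :
    aWindow words d n a i = bWindow words (words.map (stemOf d)) n a i := by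
  have hlen : i.toNat + n.toNat ≤ words.length := by omega
  have hwl : (pvWin words i n.toNat).length = n.toNat := pv_win_length words i n.toNat hlen
  rw [pv_aWindow_char words d n i hn hi hiN a]
  simp only [bWindow]
  have hwin : PySem.List.slice (words.map (stemOf d)) (some i) (some (i + n))
      = (pvWin words i n.toNat).map (stemOf d) := by
    rw [PySem.List.slice_toNat _ hi (by omega)]
    have h2 : (i + n).toNat - i.toNat = n.toNat := by omega
    rw [h2]
    simp [pvWin, List.map_take, List.map_drop]
  rw [hwin]
  set N := n.toNat with hNdef
  set win := pvWin words i N with hwindef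
  set W := win.map (stemOf d) with hWdef
  have hWl : W.length = N := by simp [hWdef, hwl]
  have hWt : ∀ (t : Nat) (ht : t < N), W[t]'(by omega) = stemOf d (win.getD t "") := by
    intro t ht
    simp only [hWdef, List.getElem_map]
    congr 1
    rw [List.getD_eq_getElem?_getD, List.getElem?_eq_getElem (by omega)]
    rfl
  have hval : ∀ (t : Nat), t < N →
      (∀ u, u < N → u ≠ t → stemOf d (win.getD u "") ≠ none) →
      bEntry W (win.getD t "") t = PySem.Str.join " " (pvEntries d win t N) := by
    intro t htN hok
    unfold bEntry
    rw [PySem.List.slice_to_natCast, show ((t : Int) + 1) = (((t+1) : Nat) : Int) by push_cast; ring,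
        PySem.List.slice_from_natCast]
    rw [pv_entries_eq d win N hwl t htN hok]
  by_cases h0 : W.count none = 0
  · have hnon : ∀ u, u < N → stemOf d (win.getD u "") ≠ none := by
      intro u hu heq
      exact (List.count_eq_zero.mp h0) (List.mem_iff_getElem.mpr ⟨u, by omega, by rw [hWt u hu, heq]⟩)
    rw [if_pos (by simp [h0])]
    rw [PySem.List.pyRange_zero, List.foldl_map]
    apply PySem.List.foldl_congr_mem'
    intro t ht a'
    have htN : t < N := by simpa using ht
    rw [if_pos ((pv_okJ_iff d win n hn t).mpr (fun u h1 h2 => hnon u h1))]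
    rw [pv_word_at words i N hi hlen t htN, Int.toNat_natCast,
        hval t htN (fun u h1 h2 => hnon u h1)]
  · by_cases h1 : W.count none = 1
    · have hmem : none ∈ W := List.count_pos_iff.mp (by omega)
      rcases hidx : List.idxOf? none W with _ | m
      · exact absurd (List.idxOf?_eq_none_iff.mp hidx) (by simpa using hmem)
      rcases List.idxOf?_eq_some_iff.mp hidx with ⟨hmW, hWm, hfirst⟩
      have hmN : m < N := by omega
      have huniq : ∀ t, t < N → t ≠ m → stemOf d (win.getD t "") ≠ none := by
        intro t ht htm heq
        have hWtnone : W[t]'(by omega) = none := by rw [hWt t ht, heq]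
        have h2le : 2 ≤ W.count none := by
          rcases Nat.lt_or_ge t m with hc | hc
          · exact pv_two_le_count W none t m hc (by omega) hWtnone hWm
          · exact pv_two_le_count W none m t (by omega) (by omega) hWm hWtnone
        omega
      have hokm : ∀ j, j < N → (pvOkJ d win n j = (j == m)) := by
        intro j hjN
        by_cases hjm : j = m
        · subst hjm
          simp only [beq_self_eq_true]
          exact (pv_okJ_iff d win n hn j).mpr (fun u h1 h2 => huniq u h1 h2)
        · have : ¬ pvOkJ d win n j = true := by
            intro hok
            exact ((pv_okJ_iff d win n hn j).mp hok m hmN (fun h => hjm h.symm))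
              (by rw [← hWt m hmN]; exact hWm)
          simp [Bool.eq_false_iff.mpr this, hjm]
      rw [if_neg (by simp [h1]), if_pos (by simp [h1])]
      have hidx' : PySem.List.index? W none = some m := by
        simp [PySem.List.index?, hidx]
      rw [hidx']
      simp only [Option.getD_some]
      rw [PySem.List.foldl_if_eq_foldl_filter,
          List.filter_congr (fun j hj => hokm j (by simpa using hj)),
          List.filter_beq, List.count_eq_one_of_mem List.nodup_range (by simpa using hmN),
          List.replicate_one, List.foldl_cons, List.foldl_nil]
      rw [pv_word_at words i N hi hlen m hmN, hval m hmN (fun u h1 h2 => huniq u h1 h2)]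
    · have h2le : 2 ≤ W.count none := by omega
      rw [if_neg (by simp [h0]), if_neg (by simp [h1])]
      rcases pv_exists_two W none h2le with ⟨p, q, hq, hpq, hp1, hq1⟩
      have hallfalse : ∀ j ∈ List.range N, ¬ (pvOkJ d win n j = true) := by
        intro j hj hok
        have hjN : j < N := by simpa using hj
        have hp' : p < N := by omega
        have hq' : q < N := by omega
        by_cases hpj : p = j
        · exact ((pv_okJ_iff d win n hn j).mp hok q hq' (by omega))
            (by rw [← hWt q hq']; exact hq1)
        · exact ((pv_okJ_iff d win n hn j).mp hok p hp' hpj)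
            (by rw [← hWt p hp']; exact hp1)
      rw [PySem.List.foldl_if_eq_foldl_filter, List.filter_eq_nil_iff.mpr hallfalse,
          List.foldl_nil]

lemma pv_aWindow_id (words : List String) (d : PySem.Dict String (List String)) (n : Int)
    (hn : n ≤ 0) (a : PySem.Dict (Int × String) String) (i : Int) :
    aWindow words d n a i = a := by
  simp only [aWindow]
  rw [PySem.List.pyRange_one_eq_nil (by omega : i + n ≤ i),
      PySem.List.pyRange_one_eq_nil (by omega : n ≤ 0)]
  simp

-- ===== VERDICT (by name: the statement is the Claim_ definition above) =====
theorem one_surface_spec : Claim_equal_one_surface := by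
  unfold Claim_equal_one_surface
  intro words dict n _
  unfold Spec_one_surface
  by_cases hn : n ≤ 0
  · simp only [one_surface, one_surface_alt, if_pos hn]
    have hfold : (PySem.List.pyRange 0 ((words.length : Int) + 1 - n)).foldl
        (aWindow words (PySem.Dict.ofList dict) n) PySem.Dict.empty = PySem.Dict.empty := by
      rw [PySem.List.foldl_congr_mem' _ _ (fun acc _ => acc) _
        (fun x _ acc => pv_aWindow_id words (PySem.Dict.ofList dict) n hn acc x)]
      exact PySem.List.foldl_ignore _ _
    rw [hfold]
    rfl
  · have hn' : 0 < n := by omega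
    simp only [one_surface, one_surface_alt, if_neg hn]
    congr 2
    apply PySem.List.foldl_congr_mem'
    intro x hx acc
    rw [PySem.List.mem_pyRange_one] at hx
    exact pv_window_eq words (PySem.Dict.ofList dict) n x hn' hx.1 (by omega) acc
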